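-- pv_equiv track=rewrite | github.com/IDNK2203/Codewars-challenges | python/Xbonacci.py | Xbonacci
-- ===== SOURCE A (Python) =====
-- def Xbonacci(signature,n):
--     newsig = signature
--     x= len(signature)
--     for i in range(n):
--         lastthree = signature[-x:]
--         nextItem = sum(lastthree)
--         newsig.append(nextItem)
--     return newsig[0:n]
-- ===== SOURCE B (Python) =====
-- def Xbonacci(signature, n):
--     # Sliding-window sum: each new term updates the running sum in O(1)
--     # instead of re-summing the last len(signature) elements.
--     # Note: A mutates its `signature` argument in place; B does not
--     # (the equivalence is about the return value).
--     full = list(signature)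
--     s = sum(full)
--     for i in range(n):
--         t = s
--         full.append(t)
--         s = s + t - full[i]
--     return full[:n]
-- ===== Notes on version B (the rewrite author's own statement) =====
-- stated objective: faster
-- what changed: Replaces A's per-iteration slice-and-resum of the last len(signature) elements by a sliding-window running sum updated with one add/subtract per generated term (B also does not mutate the signature argument, whereas A appends to it in place; the return value is identical).
import Mathlib
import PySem

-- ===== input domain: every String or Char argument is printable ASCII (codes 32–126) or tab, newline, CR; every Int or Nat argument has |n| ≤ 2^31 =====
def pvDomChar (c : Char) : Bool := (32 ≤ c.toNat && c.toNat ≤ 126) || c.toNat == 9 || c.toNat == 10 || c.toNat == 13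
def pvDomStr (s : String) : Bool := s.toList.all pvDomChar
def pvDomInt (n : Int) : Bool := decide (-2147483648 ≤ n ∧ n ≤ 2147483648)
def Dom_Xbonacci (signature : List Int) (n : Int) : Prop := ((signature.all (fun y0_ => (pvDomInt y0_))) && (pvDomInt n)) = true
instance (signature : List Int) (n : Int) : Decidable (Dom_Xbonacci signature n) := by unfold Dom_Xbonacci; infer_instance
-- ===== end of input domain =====

-- B replaces A's per-step re-summation of the last len(signature) elements by a
-- sliding-window running sum updated with one add/subtract per term (objective: faster;
-- measured).
-- A mutates its `signature` argument in place (appends to it); B does not — the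
-- equivalence proved here is about the return value only.

-- ===== PORT A =====
-- `newsig = signature` aliases: the list A slices from is the growing list itself.
def Xbonacci (signature : List Int) (n : Int) : List Int :=
  let x : Int := signature.length
  let newsig := (PySem.List.pyRange 0 n 1).foldl
    (fun sig _ =>
      let lastthree := PySem.List.slice sig (some (-x)) none
      let nextItem := lastthree.sum
      sig ++ [nextItem]) signature
  PySem.List.slice newsig (some 0) (some n)

-- ===== PORT B =====
-- full[i] is always in range (i < len(full) after the append), so pyGetD's default is never used.
def Xbonacci_alt (signature : List Int) (n : Int) : List Int :=
  let res := (PySem.List.pyRange 0 n 1).foldl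
    (fun (st : List Int × Int) i =>
      let t := st.2
      let full := st.1 ++ [t]
      (full, st.2 + t - PySem.List.pyGetD full i 0)) (signature, signature.sum)
  PySem.List.slice res.1 none (some n)

-- ===== PRECONDITION & SPEC =====
def Spec_Xbonacci (signature : List Int) (n : Int) (out : List Int) : Prop := out = Xbonacci_alt signature n
instance (signature : List Int) (n : Int) (out : List Int) : Decidable (Spec_Xbonacci signature n out) := by unfold Spec_Xbonacci; infer_instance

-- ===== CLAIM (what is proved, stated in full; the proofs are below) =====
def Claim_equal_Xbonacci : Prop := ∀ (signature : List Int) (n : Int), Dom_Xbonacci signature n → Spec_Xbonacci signature n (Xbonacci signature n)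

-- ===== LEMMAS AND PROOFS =====

-- A's loop state after m steps, indexed by Nat step count
def aF (sig : List Int) (m : Nat) : List Int :=
  (List.range m).foldl
    (fun l _ => l ++ [(PySem.List.slice l (some (-(sig.length : Int))) none).sum]) sig

-- B's loop state after m steps
def bF (sig : List Int) (m : Nat) : List Int × Int :=
  (List.range m).foldl
    (fun (st : List Int × Int) (k : Nat) =>
      (st.1 ++ [st.2], st.2 + st.2 - PySem.List.pyGetD (st.1 ++ [st.2]) (k : Int) 0))
    (sig, sig.sum)

-- the window sum A recomputes each step
def wsum (sig l : List Int) : Int := (PySem.List.slice l (some (-(sig.length : Int))) none).sum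

lemma wsum_self (sig : List Int) : wsum sig sig = sig.sum := by
  unfold wsum
  rcases Nat.eq_zero_or_pos sig.length with h | h
  · simp [h]
  · rw [PySem.List.slice_from_neg_natCast sig sig.length h]; simp

lemma wsum_nil (l : List Int) : wsum [] l = l.sum := by unfold wsum; simp

lemma aF_succ (sig : List Int) (m : Nat) :
    aF sig (m + 1) = aF sig m ++ [wsum sig (aF sig m)] := by
  unfold aF wsum; rw [List.range_succ, List.foldl_append]; simp

lemma bF_succ (sig : List Int) (m : Nat) :
    bF sig (m + 1) = ((bF sig m).1 ++ [(bF sig m).2],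
      (bF sig m).2 + (bF sig m).2
        - PySem.List.pyGetD ((bF sig m).1 ++ [(bF sig m).2]) (m : Int) 0) := by
  unfold bF; rw [List.range_succ, List.foldl_append]; simp

lemma aF_length (sig : List Int) (m : Nat) : (aF sig m).length = sig.length + m := by
  induction m with
  | zero => simp [aF]
  | succ m ih => rw [aF_succ]; simp [ih]; omega

lemma aF_sum_empty (m : Nat) : (aF [] m).sum = 0 := by
  induction m with
  | zero => simp [aF]
  | succ m ih => rw [aF_succ]; simp [wsum_nil, ih]

lemma drop_sum_step (l : List Int) (m : Nat) (h : m < l.length) :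
    (l.drop m).sum = l[m] + (l.drop (m + 1)).sum := by
  rw [List.drop_eq_getElem_cons h, List.sum_cons]

-- invariant: B's state is (A's list, its window sum)
lemma bF_eq (sig : List Int) (m : Nat) : bF sig m = (aF sig m, wsum sig (aF sig m)) := by
  induction m with
  | zero => simp [aF, bF, wsum_self]
  | succ m ih =>
    rw [bF_succ, ih, aF_succ]
    refine Prod.ext rfl ?_
    simp only []
    set l := aF sig m with hl
    set t := wsum sig l with ht
    have hlen : l.length = sig.length + m := aF_length sig m
    rcases Nat.eq_zero_or_pos sig.length with hx | hx
    · -- empty signature: everything is 0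
      have hsig : sig = [] := List.eq_nil_of_length_eq_zero hx
      have hsum : l.sum = 0 := by rw [hl, hsig]; exact aF_sum_empty m
      have hw : t = l.sum := by rw [ht, hsig, wsum_nil]
      have hm : m < (l ++ [t]).length := by simp [hlen]
      have hget : PySem.List.pyGetD (l ++ [t]) (m : Int) 0 = t := by
        rw [PySem.List.pyGetD_natCast, List.getD_eq_getElem _ _ hm]
        have hml : m = l.length := by omega
        simp [hml]
      rw [hget]
      rw [ht, hsig, wsum_nil, wsum_nil]
      simp [hsum]
    · -- nonempty signature: slide the window
      have hm : m < l.length := by omega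
      have hget : PySem.List.pyGetD (l ++ [t]) (m : Int) 0 = l[m] := by
        rw [PySem.List.pyGetD_natCast]
        rw [List.getD_eq_getElem _ _ (by simp; omega : m < (l ++ [t]).length)]
        rw [List.getElem_append_left hm]
      rw [hget]
      have hdropnew : PySem.List.slice (l ++ [t]) (some (-(sig.length : Int))) none
          = l.drop (m + 1) ++ [t] := by
        rw [PySem.List.slice_from_neg_natCast _ sig.length hx]
        rw [List.drop_append_of_le_length (by simp [hlen]; omega)]
        congr 2
        simp [hlen]; omega
      have hdropold : t = (l.drop m).sum := by
        rw [ht]; unfold wsum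
        rw [PySem.List.slice_from_neg_natCast _ sig.length hx]
        congr 2
        omega
      unfold wsum
      rw [hdropnew]
      have hstep := drop_sum_step l m hm
      simp only [List.sum_append, List.sum_cons, List.sum_nil]
      omega

-- ===== VERDICT (by name: the statement is the Claim_ definition above) =====
theorem Xbonacci_spec : Claim_equal_Xbonacci := by
  intro sig n _
  unfold Spec_Xbonacci Xbonacci Xbonacci_alt
  dsimp only
  rw [PySem.List.pyRange_one]
  simp only [List.foldl_map, zero_add, sub_zero]
  change PySem.List.slice (aF sig n.toNat) (some 0) (some n)
      = PySem.List.slice (bF sig n.toNat).1 none (some n)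
  rw [bF_eq, PySem.List.slice_zero_start]
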